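-- pv_equiv track=rewrite | github.com/jcraig949jfi/Prometheus | noesis/v2/forbidden_chains.py | count_chain_support
-- ===== SOURCE A (Python) =====
-- def count_chain_support(hub_ops, chain):
--     """Count how many hubs have ALL operators in the chain."""
--     a, b, c = chain
--     required = {a, b, c}
--     count = 0
--     supporting_hubs = []
--     for hub, ops in hub_ops.items():
--         if required.issubset(ops):
--             count += 1
--             if count <= 10:  # keep sample
--                 supporting_hubs.append(hub)
--     return count, supporting_hubs
-- ===== SOURCE B (Python) =====
-- def count_chain_support(hub_ops, chain):
--     a, b, c = chain
--     index = {}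
--     for hub, ops in hub_ops.items():
--         for op in dict.fromkeys(ops):
--             index.setdefault(op, []).append(hub)
--     cand = [h for h in index.get(a, [])
--             if h in index.get(b, []) and h in index.get(c, [])]
--     return len(cand), cand[:10]
-- ===== Notes on version B (the rewrite author's own statement) =====
-- stated objective: alternative
-- what changed: Replaces the per-hub subset test with an inverted index (operator -> ordered list of hubs) built in one nested pass; the answer is read off by filtering the a-bucket by membership in the b- and c-buckets, so no set-subset test per hub is performed.
import Mathlib
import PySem

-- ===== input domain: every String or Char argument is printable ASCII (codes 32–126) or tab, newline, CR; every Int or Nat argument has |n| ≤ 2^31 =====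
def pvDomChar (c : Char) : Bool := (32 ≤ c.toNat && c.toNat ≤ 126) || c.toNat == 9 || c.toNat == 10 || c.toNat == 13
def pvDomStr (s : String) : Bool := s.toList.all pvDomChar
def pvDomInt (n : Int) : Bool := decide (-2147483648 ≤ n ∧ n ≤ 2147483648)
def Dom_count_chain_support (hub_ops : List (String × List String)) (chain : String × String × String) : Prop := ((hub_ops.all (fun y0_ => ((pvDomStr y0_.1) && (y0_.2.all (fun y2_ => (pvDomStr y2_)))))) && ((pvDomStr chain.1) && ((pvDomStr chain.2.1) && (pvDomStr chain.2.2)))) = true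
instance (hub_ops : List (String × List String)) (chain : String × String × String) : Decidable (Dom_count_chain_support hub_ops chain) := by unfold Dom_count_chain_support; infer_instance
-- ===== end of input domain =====

-- B builds an inverted index op → list of hubs instead of testing each hub's ops for subset;
-- the supporting sample is read off the a-bucket filtered by the b- and c-buckets (objective: alternative).
-- ===== PORT A =====
def count_chain_support (hub_ops : List (String × List String)) (chain : String × String × String) : Int × List String :=
  let a := chain.1
  let b := chain.2.1
  let c := chain.2.2
  let required : PySem.Set String := PySem.Set.ofList [a, b, c]
  let r := hub_ops.foldl (fun (st : Int × List String) p =>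
      if PySem.Set.issubset required p.2 then
        (st.1 + 1, if st.1 + 1 ≤ 10 then st.2 ++ [p.1] else st.2)
      else st) (0, [])
  r

-- ===== PORT B =====
-- the nested index-building loop of Source B: for hub, ops: for op in dict.fromkeys(ops): index.setdefault(op, []).append(hub)
def csAltIndex (hub_ops : List (String × List String)) : PySem.Dict String (List String) :=
  hub_ops.foldl (fun idx p =>
    (PySem.List.dedup p.2).foldl (fun idx op => idx.modify op [] (· ++ [p.1])) idx)
    PySem.Dict.empty

def count_chain_support_alt (hub_ops : List (String × List String)) (chain : String × String × String) : Int × List String :=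
  let a := chain.1
  let b := chain.2.1
  let c := chain.2.2
  let index := csAltIndex hub_ops
  let cand := (index.getD a []).filter
      (fun h => (index.getD b []).contains h && (index.getD c []).contains h)
  ((cand.length : Int), cand.take 10)

-- ===== PRECONDITION & SPEC =====
-- Pre_ excludes association lists with duplicate hub keys: they cannot arise from a Python dict
-- (A's parameter hub_ops is a dict), and on them A counts entries while B counts distinct hubs.
def Pre_count_chain_support (hub_ops : List (String × List String)) (chain : String × String × String) : Prop :=
  (hub_ops.map Prod.fst).Nodup
instance (hub_ops : List (String × List String)) (chain : String × String × String) : Decidable (Pre_count_chain_support hub_ops chain) := by unfold Pre_count_chain_support; infer_instance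
def pvWitness_count_chain_support : (List (String × List String)) × (String × String × String) :=
  ([("h1", ["x", "y", "z"]), ("h2", ["x", "y"]), ("h3", ["z", "x", "y", "w"])], ("x", "y", "z"))

def Spec_count_chain_support (hub_ops : List (String × List String)) (chain : String × String × String) (out : Int × List String) : Prop := out = count_chain_support_alt hub_ops chain
instance (hub_ops : List (String × List String)) (chain : String × String × String) (out : Int × List String) : Decidable (Spec_count_chain_support hub_ops chain out) := by unfold Spec_count_chain_support; infer_instance

-- ===== CLAIM (what is proved, stated in full; the proofs are below) =====
def Claim_equal_count_chain_support : Prop := ∀ (hub_ops : List (String × List String)) (chain : String × String × String), Dom_count_chain_support hub_ops chain → Pre_count_chain_support hub_ops chain → Spec_count_chain_support hub_ops chain (count_chain_support hub_ops chain)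

-- ===== LEMMAS AND PROOFS =====

-- A's loop: the running pair is (number of filtered entries so far, first 10 of their hubs).
theorem csA_foldl (l : List (String × List String)) (P : String × List String → Bool)
    (count : Int) (sup : List String) :
    l.foldl (fun (st : Int × List String) p =>
        if P p then (st.1 + 1, if st.1 + 1 ≤ 10 then st.2 ++ [p.1] else st.2) else st) (count, sup)
    = (count + ((l.filter P).length : Int),
       sup ++ ((l.filter P).map Prod.fst).take (10 - count).toNat) := by
  induction l generalizing count sup with
  | nil => simp
  | cons p l ih =>
    cases hp : P p with
    | true =>
      simp only [List.foldl_cons, hp, if_true, List.filter_cons_of_pos hp, List.map_cons,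
        List.length_cons]
      by_cases hc : count + 1 ≤ 10
      · rw [if_pos hc, ih, show (10 - count).toNat = (10 - (count + 1)).toNat + 1 by omega,
          List.take_succ_cons]
        simp only [Prod.mk.injEq]
        exact ⟨by push_cast; ring, by simp⟩
      · rw [if_neg hc, ih, show (10 - count).toNat = 0 by omega,
          show (10 - (count + 1)).toNat = 0 by omega]
        simp only [Prod.mk.injEq, List.take_zero]
        exact ⟨by push_cast; ring, by simp⟩
    | false =>
      rw [List.filter_cons_of_neg (by simp [hp])]
      simp only [List.foldl_cons, hp, Bool.false_eq_true, if_false]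
      exact ih count sup

-- inner loop of B's index build: one hub adds itself once under each of its (distinct) ops
theorem csAlt_inner (hub : String) (ops : List String) (d : PySem.Dict String (List String))
    (c : String) :
    ((PySem.List.dedup ops).foldl (fun d op => d.modify op [] (· ++ [hub])) d).getD c []
    = d.getD c [] ++ (if ops.contains c then [hub] else []) := by
  have hmap : (PySem.List.dedup ops).foldl (fun d op => d.modify op [] (· ++ [hub])) d
      = ((PySem.List.dedup ops).map (fun op => (op, hub))).foldl
          (fun d (p : String × String) => d.modify p.1 [] (· ++ [p.2])) d := by
    rw [List.foldl_map]
  rw [hmap, PySem.Dict.getD_foldl_modify_append]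
  congr 1
  have hfin : (((PySem.List.dedup ops).map (fun op => (op, hub))).filter
        (fun p => p.1 == c)).map (·.2)
      = ((PySem.List.dedup ops).filter (fun op => op == c)).map (fun _ => hub) := by
    rw [List.filter_map, List.map_map]
    simp [Function.comp_def]
  rw [hfin]
  by_cases hc : ops.contains c = true
  · have hmem : c ∈ PySem.List.dedup ops := by
      rw [PySem.List.mem_dedup]; exact by simpa using hc
    have hcount : (PySem.List.dedup ops).count c = 1 :=
      List.count_eq_one_of_mem (PySem.List.nodup_dedup ops) hmem
    have hfil : (PySem.List.dedup ops).filter (fun op => op == c) = [c] := by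
      rw [List.filter_beq, hcount]; rfl
    rw [hfil, hc]
    simp
  · have hmem : c ∉ PySem.List.dedup ops := by
      rw [PySem.List.mem_dedup]; simpa using hc
    have hfil : (PySem.List.dedup ops).filter (fun op => op == c) = [] := by
      rw [List.filter_beq, List.count_eq_zero_of_not_mem hmem]; rfl
    rw [hfil]
    have hnm : c ∉ ops := by simpa using hc
    simp [hnm]

-- B's bucket for an operator is exactly the hubs (in order) whose ops contain it
theorem csAlt_bucket (hub_ops : List (String × List String)) (c : String) :
    (csAltIndex hub_ops).getD c []
    = (hub_ops.filter (fun p => p.2.contains c)).map Prod.fst := by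
  suffices h : ∀ (l : List (String × List String)) (d : PySem.Dict String (List String)),
      (l.foldl (fun idx p =>
        (PySem.List.dedup p.2).foldl (fun idx op => idx.modify op [] (· ++ [p.1])) idx) d).getD c []
      = d.getD c [] ++ (l.filter (fun p => p.2.contains c)).map Prod.fst by
    have := h hub_ops PySem.Dict.empty
    simpa [csAltIndex] using this
  intro l
  induction l with
  | nil => simp
  | cons p l ih =>
    intro d
    simp only [List.foldl_cons]
    rw [ih, csAlt_inner]
    cases hc : p.2.contains c with
    | true =>
      have h' : c ∈ p.2 := by simpa using hc
      simp [h']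
    | false =>
      have h' : c ∉ p.2 := by simpa using hc
      simp [h']

theorem mem_map_fst_filter_iff {Q : String × List String → Bool}
    (hub_ops : List (String × List String)) (hnd : (hub_ops.map Prod.fst).Nodup)
    (p : String × List String) (hp : p ∈ hub_ops) :
    (p.1 ∈ (hub_ops.filter Q).map Prod.fst) ↔ Q p = true := by
  constructor
  · intro h
    obtain ⟨q, hq, hq1⟩ := List.mem_map.mp h
    have hql := List.mem_of_mem_filter hq
    have hinj := List.inj_on_of_nodup_map hnd
    have : q = p := hinj hql hp hq1
    subst this
    exact List.of_mem_filter hq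
  · intro h
    exact List.mem_map.mpr ⟨p, List.mem_filter.mpr ⟨hp, h⟩, rfl⟩

-- ===== VERDICT (by name: the statement is the Claim_ definition above) =====
theorem count_chain_support_spec : Claim_equal_count_chain_support := by
  intro hub_ops chain _hdom hpre
  unfold Spec_count_chain_support count_chain_support count_chain_support_alt
  obtain ⟨a, b, c⟩ := chain
  simp only []
  rw [csA_foldl, csAlt_bucket, csAlt_bucket, csAlt_bucket]
  rw [List.filter_map]
  have hfeq : (hub_ops.filter (fun p => p.2.contains a)).filter
        (fun p => ((hub_ops.filter (fun p => p.2.contains b)).map Prod.fst).contains p.1 &&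
                   ((hub_ops.filter (fun p => p.2.contains c)).map Prod.fst).contains p.1)
      = hub_ops.filter (fun p =>
          p.2.contains a && p.2.contains b && p.2.contains c) := by
    rw [List.filter_filter]
    apply List.filter_congr
    intro p hp
    have hb := mem_map_fst_filter_iff (Q := fun p => p.2.contains b) hub_ops hpre p hp
    have hc := mem_map_fst_filter_iff (Q := fun p => p.2.contains c) hub_ops hpre p hp
    simp only [List.contains_iff_mem] at *
    by_cases h1 : p.2.contains a <;> by_cases h2 : p.2.contains b <;>
      by_cases h3 : p.2.contains c <;>
      simp_all
  have hpeq : (fun p : String × List String =>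
        PySem.Set.issubset (PySem.Set.ofList [a, b, c]) p.2)
      = fun p => p.2.contains a && p.2.contains b && p.2.contains c := by
    funext p
    have hiff : PySem.Set.issubset (PySem.Set.ofList [a, b, c]) p.2 = true
        ↔ (p.2.contains a && p.2.contains b && p.2.contains c) = true := by
      rw [PySem.Set.issubset_iff]
      simp only [Bool.and_eq_true, List.contains_iff_mem]
      constructor
      · intro hall
        exact ⟨⟨hall a (by simp [PySem.Set.mem_ofList]),
               hall b (by simp [PySem.Set.mem_ofList])⟩,
               hall c (by simp [PySem.Set.mem_ofList])⟩
      · intro h x hx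
        rw [PySem.Set.mem_ofList] at hx
        rcases (by simpa using hx : x = a ∨ x = b ∨ x = c) with rfl | rfl | rfl
        · exact h.1.1
        · exact h.1.2
        · exact h.2
    cases h1 : PySem.Set.issubset (PySem.Set.ofList [a, b, c]) p.2 with
    | true => exact (hiff.mp h1).symm
    | false =>
      cases h2 : (p.2.contains a && p.2.contains b && p.2.contains c) with
      | true => rw [hiff.mpr h2] at h1; exact absurd h1 (by simp)
      | false => rfl
  rw [hpeq]
  simp only [Function.comp_def]
  rw [hfeq]
  simp
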